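-- pv_equiv track=rewrite | github.com/marcie-kang/algorithm-practice | python/[6kyu].py | fruit
-- ===== SOURCE A (Python) =====
-- from collections import Counter
--
-- SCORING = {
--     "Wild": [0, 10, 100],
--     "Star": [18, 9, 90],
--     "Bell": [16, 8, 80],
--     "Shell": [14, 7, 70],
--     "Seven": [12, 6, 60],
--     "Cherry": [10, 5, 50],
--     "Bar": [8, 4, 40],
--     "King": [6, 3, 30],
--     "Queen": [4, 2, 20],
--     "Jack": [2, 1, 10]
-- }
--
-- def fruit(reels, spins):
--     result = Counter([reels[0][spins[0]], reels[1][spins[1]], reels[2][spins[2]]])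
--     final_score = 0
--
--     for key, value in result.items():
--         if value == 3 and len(list(result)) == 1:
--             final_score = SCORING[key][2]
--         elif (value == 2 and not "Wild" in result) or (key == "Wild" and value == 2):
--             final_score = SCORING[key][1]
--         elif key != "Wild" and value == 2 and "Wild" in result:
--             final_score = SCORING[key][0]
--
--     return final_score
-- ===== SOURCE B (Python) =====
-- SCORING = {
--     "Wild": [0, 10, 100],
--     "Star": [18, 9, 90],
--     "Bell": [16, 8, 80],
--     "Shell": [14, 7, 70],
--     "Seven": [12, 6, 60],
--     "Cherry": [10, 5, 50],
--     "Bar": [8, 4, 40],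
--     "King": [6, 3, 30],
--     "Queen": [4, 2, 20],
--     "Jack": [2, 1, 10]
-- }
--
-- def fruit(reels, spins):
--     s0 = reels[0][spins[0]]
--     s1 = reels[1][spins[1]]
--     s2 = reels[2][spins[2]]
--     if s0 == s1 == s2:
--         return SCORING[s0][2]
--     if s0 == s1 or s0 == s2:
--         pair = s0
--     elif s1 == s2:
--         pair = s1
--     else:
--         return 0
--     if pair == "Wild" or "Wild" not in (s0, s1, s2):
--         return SCORING[pair][1]
--     return SCORING[pair][0]
-- ===== Notes on version B (the rewrite author's own statement) =====
-- stated objective: simpler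
-- what changed: B drops the Counter and the items loop: it reads the three symbols, branches directly on triple / pair / no-match, and indexes SCORING only in a scoring branch.
import Mathlib
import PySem

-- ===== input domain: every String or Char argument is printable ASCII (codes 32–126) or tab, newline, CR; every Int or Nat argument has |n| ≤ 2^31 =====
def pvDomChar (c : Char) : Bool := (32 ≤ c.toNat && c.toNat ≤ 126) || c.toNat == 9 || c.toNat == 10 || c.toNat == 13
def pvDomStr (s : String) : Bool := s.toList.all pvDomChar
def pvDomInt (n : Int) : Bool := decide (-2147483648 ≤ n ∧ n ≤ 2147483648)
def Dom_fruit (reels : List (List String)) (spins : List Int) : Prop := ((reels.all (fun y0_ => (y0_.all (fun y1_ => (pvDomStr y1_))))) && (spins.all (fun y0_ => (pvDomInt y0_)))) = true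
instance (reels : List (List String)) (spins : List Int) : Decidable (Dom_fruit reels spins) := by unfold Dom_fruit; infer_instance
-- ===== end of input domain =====

-- B restructures A's Counter-and-loop scoring into direct branching on the three
-- drawn symbols (triple / pair / no match), looking up SCORING only when a score
-- is due — simpler, no counting pass. Equivalence is over the return value.

-- ===== PORT A =====
-- the module-level SCORING dict
def SCORING : PySem.Dict String (List Int) := PySem.Dict.ofList
  [("Wild", [0, 10, 100]), ("Star", [18, 9, 90]), ("Bell", [16, 8, 80]),
   ("Shell", [14, 7, 70]), ("Seven", [12, 6, 60]), ("Cherry", [10, 5, 50]),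
   ("Bar", [8, 4, 40]), ("King", [6, 3, 30]), ("Queen", [4, 2, 20]),
   ("Jack", [2, 1, 10])]

-- SCORING[key][j]; total via defaults — Pre_fruit excludes the KeyError inputs
def scoreAt (key : String) (j : Int) : Int :=
  PySem.List.pyGetD (SCORING.getD key []) j 0

-- A's body after the three reel reads: Counter, then the for-loop over items
def fruitEval (e0 e1 e2 : String) : Int :=
  let result := PySem.Dict.counter [e0, e1, e2]
  result.items.foldl (fun final_score kv =>
    let key := kv.1
    let value := kv.2
    if value == 3 && result.size == 1 then scoreAt key 2
    else if (value == 2 && !(result.contains "Wild")) || (key == "Wild" && value == 2) then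
      scoreAt key 1
    else if key != "Wild" && value == 2 && result.contains "Wild" then scoreAt key 0
    else final_score) 0

def fruit (reels : List (List String)) (spins : List Int) : Int :=
  fruitEval
    (PySem.List.pyGetD (PySem.List.pyGetD reels 0 []) (PySem.List.pyGetD spins 0 0) "")
    (PySem.List.pyGetD (PySem.List.pyGetD reels 1 []) (PySem.List.pyGetD spins 1 0) "")
    (PySem.List.pyGetD (PySem.List.pyGetD reels 2 []) (PySem.List.pyGetD spins 2 0) "")

-- ===== PORT B =====
-- Source B's body after the three reel reads: triple, else pick the pair symbol, else 0
def fruitAltEval (s0 s1 s2 : String) : Int :=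
  if s0 = s1 ∧ s1 = s2 then scoreAt s0 2
  else
    match (if s0 = s1 ∨ s0 = s2 then some s0
           else if s1 = s2 then some s1 else none) with
    | none => 0
    | some pair =>
        if pair = "Wild" ∨ ¬ ("Wild" = s0 ∨ "Wild" = s1 ∨ "Wild" = s2) then scoreAt pair 1
        else scoreAt pair 0

def fruit_alt (reels : List (List String)) (spins : List Int) : Int :=
  fruitAltEval
    (PySem.List.pyGetD (PySem.List.pyGetD reels 0 []) (PySem.List.pyGetD spins 0 0) "")
    (PySem.List.pyGetD (PySem.List.pyGetD reels 1 []) (PySem.List.pyGetD spins 1 0) "")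
    (PySem.List.pyGetD (PySem.List.pyGetD reels 2 []) (PySem.List.pyGetD spins 2 0) "")

-- ===== PRECONDITION & SPEC =====
-- reels[i][spins[i]] for i = 0,1,2 as Python evaluates it (none = IndexError)
def symAt (reels : List (List String)) (spins : List Int) (i : Int) : Option String :=
  (PySem.List.pyGet? reels i).bind fun r =>
    (PySem.List.pyGet? spins i).bind fun j => PySem.List.pyGet? r j

def knownSymbols : List String :=
  ["Wild", "Star", "Bell", "Shell", "Seven", "Cherry", "Bar", "King", "Queen", "Jack"]

-- Pre_ = exactly the inputs where Python A returns: the three reel reads are in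
-- range (else IndexError) and, when two or three drawn symbols coincide, the
-- repeated symbol is a SCORING key (else KeyError).
def Pre_fruit (reels : List (List String)) (spins : List Int) : Prop :=
  (match symAt reels spins 0, symAt reels spins 1, symAt reels spins 2 with
   | some s0, some s1, some s2 =>
       (!(s0 == s1) || knownSymbols.contains s0) &&
       (!(s1 == s2) || knownSymbols.contains s1) &&
       (!(s0 == s2) || knownSymbols.contains s0)
   | _, _, _ => false) = true

instance (reels : List (List String)) (spins : List Int) : Decidable (Pre_fruit reels spins) := by
  unfold Pre_fruit; infer_instance

def pvWitness_fruit : List (List String) × List Int :=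
  ([["Cherry", "Star"], ["Bell", "Cherry"], ["Jack", "Wild"]], [0, 1, 1])

def Spec_fruit (reels : List (List String)) (spins : List Int) (out : Int) : Prop := out = fruit_alt reels spins
instance (reels : List (List String)) (spins : List Int) (out : Int) : Decidable (Spec_fruit reels spins out) := by unfold Spec_fruit; infer_instance

-- ===== CLAIM (what is proved, stated in full; the proofs are below) =====
def Claim_equal_fruit : Prop := ∀ (reels : List (List String)) (spins : List Int), Dom_fruit reels spins → Pre_fruit reels spins → Spec_fruit reels spins (fruit reels spins)

-- ===== LEMMAS AND PROOFS =====

-- the two bodies agree on any three symbols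
theorem fruitEval_eq (s0 s1 s2 : String) : fruitEval s0 s1 s2 = fruitAltEval s0 s1 s2 := by
  unfold fruitEval fruitAltEval
  by_cases h01 : s0 = s1
  · rcases h01
    by_cases h12 : s0 = s2
    · rcases h12
      simp [PySem.Dict.items_counter, PySem.Set.ofList, PySem.Set.add, PySem.Dict.size,
      PySem.Dict.contains_counter, List.foldl]
    · have h21 : ¬ s2 = s0 := fun h => h12 h.symm
      by_cases hw0 : s0 = "Wild"
      · rcases hw0
        simp [PySem.Dict.items_counter, PySem.Set.ofList, PySem.Set.add, PySem.Dict.size,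
      PySem.Dict.contains_counter, List.foldl, h12, h21]
      · have hw0' : ¬ "Wild" = s0 := fun h => hw0 h.symm
        by_cases hw2 : s2 = "Wild"
        · rcases hw2
          simp [PySem.Dict.items_counter, PySem.Set.ofList, PySem.Set.add, PySem.Dict.size,
      PySem.Dict.contains_counter, List.foldl, h12, h21]
        · have hw2' : ¬ "Wild" = s2 := fun h => hw2 h.symm
          simp [PySem.Dict.items_counter, PySem.Set.ofList, PySem.Set.add, PySem.Dict.size,
      PySem.Dict.contains_counter, List.foldl, h12, h21, hw0, hw0', hw2, hw2']
  · have h10 : ¬ s1 = s0 := fun h => h01 h.symm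
    by_cases h12 : s1 = s2
    · rcases h12
      by_cases hw0 : s0 = "Wild"
      · rcases hw0
        simp [PySem.Dict.items_counter, PySem.Set.ofList, PySem.Set.add, PySem.Dict.size,
      PySem.Dict.contains_counter, List.foldl, h01, h10]
      · have hw0' : ¬ "Wild" = s0 := fun h => hw0 h.symm
        by_cases hw1 : s1 = "Wild"
        · rcases hw1
          simp [PySem.Dict.items_counter, PySem.Set.ofList, PySem.Set.add, PySem.Dict.size,
      PySem.Dict.contains_counter, List.foldl, h01, h10]
        · have hw1' : ¬ "Wild" = s1 := fun h => hw1 h.symm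
          simp [PySem.Dict.items_counter, PySem.Set.ofList, PySem.Set.add, PySem.Dict.size,
      PySem.Dict.contains_counter, List.foldl, h01, h10, hw0', hw1, hw1']
    · have h21 : ¬ s2 = s1 := fun h => h12 h.symm
      by_cases h02 : s0 = s2
      · rcases h02
        by_cases hw0 : s0 = "Wild"
        · rcases hw0
          simp [PySem.Dict.items_counter, PySem.Set.ofList, PySem.Set.add, PySem.Dict.size,
      PySem.Dict.contains_counter, List.foldl, h01, h10]
        · have hw0' : ¬ "Wild" = s0 := fun h => hw0 h.symm
          by_cases hw1 : s1 = "Wild"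
          · rcases hw1
            simp [PySem.Dict.items_counter, PySem.Set.ofList, PySem.Set.add, PySem.Dict.size,
      PySem.Dict.contains_counter, List.foldl, h01, h10]
          · have hw1' : ¬ "Wild" = s1 := fun h => hw1 h.symm
            simp [PySem.Dict.items_counter, PySem.Set.ofList, PySem.Set.add, PySem.Dict.size,
      PySem.Dict.contains_counter, List.foldl, h01, h10, hw0, hw0', hw1, hw1']
      · have h20 : ¬ s2 = s0 := fun h => h02 h.symm
        simp [PySem.Dict.items_counter, PySem.Set.ofList, PySem.Set.add, PySem.Dict.size,
      PySem.Dict.contains_counter, List.foldl, h01, h10, h12, h21, h02, h20]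

-- ===== VERDICT (by name: the statement is the Claim_ definition above) =====
theorem fruit_spec : Claim_equal_fruit := by
  intro reels spins _ _
  unfold Spec_fruit fruit fruit_alt
  exact fruitEval_eq _ _ _
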